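-- pv_equiv track=rewrite | github.com/SungHyunIBS/monitor_pc | files/2_monitor/script/webcam/webcam_ana.py | decode_segments
-- ===== SOURCE A (Python) =====
-- digit_map_resist = { # A,B,C,D,E,F,G
--     (1,1,1,1,1,1,0): "0", (0,1,1,0,0,0,0): "1",
--     (1,1,0,1,1,0,1): "2", (1,1,1,1,0,0,1): "3",
--     (0,1,1,0,0,1,1): "4", (1,0,1,1,0,1,1): "5",
--     (1,0,1,1,1,1,1): "6", (1,1,1,0,0,0,0): "7",
--     (1,1,1,1,1,1,1): "8", (1,1,1,1,0,1,1): "9"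
-- }
--
-- digit_map_temp = { # A,B,C,D,E,F,G,H,I,J
--     (1,1,1,1,1,1,1,1,0,0): "0", (0,0,1,1,0,0,0,0,0,0): "1",
--     (1,1,1,0,1,1,1,0,1,1): "2", (1,1,1,1,1,1,0,0,1,1): "3",
--     (0,0,1,1,0,0,0,1,1,1): "4", (1,1,0,1,1,1,0,1,1,1): "5",
--     (1,1,0,1,1,1,1,1,1,1): "6", (1,1,1,1,0,0,0,0,0,0): "7",
--     (1,1,1,1,1,1,1,1,1,1): "8", (1,1,1,1,0,0,0,1,1,1): "9"
-- }
--
-- def decode_segments(active, typename):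
--
--     pos_ids = sorted({p for _,p in active if _ != "."}) #1, 2, 3
--     if typename == "resist":
--         seg_order = ['A','B','C','D','E','F','G']
--         digit_map = digit_map_resist
--     else:
--         seg_order = ['A','B','C','D','E','F','G','H','I','J']
--         digit_map = digit_map_temp
--
--     pos_map = {pid:set() for pid in pos_ids}
--
--     dot = any(lbl=="." for lbl,_ in active)
--     for lbl, pid in active:
--         if lbl == ".":
--             continue
--         pos_map[pid].add(lbl[0])
--
--     digits = []
--     for pid in pos_ids:
--         flags = tuple(int(s in pos_map[pid]) for s in seg_order)
--         digits.append(digit_map.get(flags, "?"))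
--     if dot and len(digits)>=2:
--         return "".join(digits[:-1]) + "." + digits[-1]
--     return "".join(digits)
-- ===== SOURCE B (Python) =====
-- digit_map_resist = { # A,B,C,D,E,F,G
--     (1,1,1,1,1,1,0): "0", (0,1,1,0,0,0,0): "1",
--     (1,1,0,1,1,0,1): "2", (1,1,1,1,0,0,1): "3",
--     (0,1,1,0,0,1,1): "4", (1,0,1,1,0,1,1): "5",
--     (1,0,1,1,1,1,1): "6", (1,1,1,0,0,0,0): "7",
--     (1,1,1,1,1,1,1): "8", (1,1,1,1,0,1,1): "9"
-- }
--
-- digit_map_temp = { # A,B,C,D,E,F,G,H,I,J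
--     (1,1,1,1,1,1,1,1,0,0): "0", (0,0,1,1,0,0,0,0,0,0): "1",
--     (1,1,1,0,1,1,1,0,1,1): "2", (1,1,1,1,1,1,0,0,1,1): "3",
--     (0,0,1,1,0,0,0,1,1,1): "4", (1,1,0,1,1,1,0,1,1,1): "5",
--     (1,1,0,1,1,1,1,1,1,1): "6", (1,1,1,1,0,0,0,0,0,0): "7",
--     (1,1,1,1,1,1,1,1,1,1): "8", (1,1,1,1,0,0,0,1,1,1): "9"
-- }
--
--
-- def _pack(flags):
--     m = 0
--     for i, f in enumerate(flags):
--         m |= f << i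
--     return m
--
--
-- # the two dicts list digits 0..9 in insertion order, so masks[d] is digit d's mask
-- _MASKS_RESIST = [_pack(f) for f in digit_map_resist]
-- _MASKS_TEMP = [_pack(f) for f in digit_map_temp]
--
--
-- def _digit(masks, m):
--     try:
--         return str(masks.index(m))
--     except ValueError:
--         return "?"
--
--
-- def decode_segments(active, typename):
--     if typename == "resist":
--         segs, masks = ['A','B','C','D','E','F','G'], _MASKS_RESIST
--     else:
--         segs, masks = ['A','B','C','D','E','F','G','H','I','J'], _MASKS_TEMP
--
--     dot = any(lbl == "." for lbl, _ in active)
--     # sort the segment hits by position, then decode run by run in one scan,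
--     # OR-ing each hit's segment bit into the current position's mask
--     entries = sorted(((pid, lbl[0]) for lbl, pid in active if lbl != "."),
--                      key=lambda e: e[0])
--     digits = []
--     cur = None
--     mask = 0
--     for pid, ch in entries:
--         if pid != cur:
--             if cur is not None:
--                 digits.append(_digit(masks, mask))
--             cur, mask = pid, 0
--         if ch in segs:
--             mask |= 1 << segs.index(ch)
--     if cur is not None:
--         digits.append(_digit(masks, mask))
--
--     if dot and len(digits) >= 2:
--         return "".join(digits[:-1]) + "." + digits[-1]
--     return "".join(digits)
-- ===== Notes on version B (the rewrite author's own statement) =====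
-- stated objective: alternative
-- what changed: Instead of A's grouping into a pid-keyed dict of letter sets followed by a flag-tuple rebuild and dict lookup per position, B sorts the segment hits by position once and decodes in a single linear scan over the sorted list, OR-ing each hit's segment bit into a running mask and emitting a digit at each run boundary as the mask's index in a precomputed per-digit mask list.
import Mathlib
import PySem

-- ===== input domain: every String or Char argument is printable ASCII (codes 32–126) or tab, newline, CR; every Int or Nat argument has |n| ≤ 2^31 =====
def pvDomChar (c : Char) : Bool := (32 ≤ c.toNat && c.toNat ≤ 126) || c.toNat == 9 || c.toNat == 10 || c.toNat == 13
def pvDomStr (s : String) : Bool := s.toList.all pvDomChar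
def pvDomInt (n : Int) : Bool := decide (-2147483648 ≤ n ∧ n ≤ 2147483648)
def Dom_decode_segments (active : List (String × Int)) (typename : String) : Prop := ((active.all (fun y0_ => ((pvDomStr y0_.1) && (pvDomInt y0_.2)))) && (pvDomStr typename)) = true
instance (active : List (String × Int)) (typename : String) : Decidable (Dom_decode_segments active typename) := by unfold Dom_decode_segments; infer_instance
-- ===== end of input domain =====

-- B sorts the segment hits by position once and decodes them in ONE linear scan, OR-ing each
-- hit's segment bit into a running mask and emitting a digit at every run boundary as the mask's
-- index in a per-digit mask list — instead of A's pid-keyed dict of letter sets rebuilt into a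
-- flag tuple and looked up per position; return values proved equal on Pre_.

-- ===== PORT A =====
def digit_map_resist : PySem.Dict (List Int) String := PySem.Dict.ofList [
  ([1,1,1,1,1,1,0],"0"), ([0,1,1,0,0,0,0],"1"),
  ([1,1,0,1,1,0,1],"2"), ([1,1,1,1,0,0,1],"3"),
  ([0,1,1,0,0,1,1],"4"), ([1,0,1,1,0,1,1],"5"),
  ([1,0,1,1,1,1,1],"6"), ([1,1,1,0,0,0,0],"7"),
  ([1,1,1,1,1,1,1],"8"), ([1,1,1,1,0,1,1],"9")]

def digit_map_temp : PySem.Dict (List Int) String := PySem.Dict.ofList [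
  ([1,1,1,1,1,1,1,1,0,0],"0"), ([0,0,1,1,0,0,0,0,0,0],"1"),
  ([1,1,1,0,1,1,1,0,1,1],"2"), ([1,1,1,1,1,1,0,0,1,1],"3"),
  ([0,0,1,1,0,0,0,1,1,1],"4"), ([1,1,0,1,1,1,0,1,1,1],"5"),
  ([1,1,0,1,1,1,1,1,1,1],"6"), ([1,1,1,1,0,0,0,0,0,0],"7"),
  ([1,1,1,1,1,1,1,1,1,1],"8"), ([1,1,1,1,0,0,0,1,1,1],"9")]

def decode_segments (active : List (String × Int)) (typename : String) : String :=
  let posIds : List Int :=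
    PySem.List.sorted (PySem.Set.ofList ((active.filter (fun y => !(y.1 == "."))).map (fun y => y.2))) (fun x => x) false
  let segOrder : List Char :=
    if typename == "resist" then ['A','B','C','D','E','F','G']
    else ['A','B','C','D','E','F','G','H','I','J']
  let digitMap : PySem.Dict (List Int) String :=
    if typename == "resist" then digit_map_resist else digit_map_temp
  let posMap0 : PySem.Dict Int (PySem.Set Char) :=
    posIds.foldl (fun d pid => d.insert pid PySem.Set.empty) PySem.Dict.empty
  let dot : Bool := active.any (fun y => y.1 == ".")
  -- lbl[0] raises IndexError on an empty label — those inputs are excluded by Pre_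
  let posMap : PySem.Dict Int (PySem.Set Char) :=
    active.foldl (fun d y =>
      if y.1 == "." then d
      else d.modify y.2 PySem.Set.empty (fun s => PySem.Set.add s ((PySem.Str.pyGet? y.1 0).getD ' '))) posMap0
  let digits : List String :=
    posIds.foldl (fun acc pid =>
      acc ++ [digitMap.getD
        (segOrder.map (fun s => if PySem.Set.contains (posMap.getD pid PySem.Set.empty) s then (1:Int) else 0)) "?"]) []
  if dot && decide (2 ≤ digits.length) then
    PySem.Str.join "" (PySem.List.slice digits none (some (-1))) ++ "." ++ ((PySem.List.pyGet? digits (-1)).getD "")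
  else
    PySem.Str.join "" digits

-- ===== PORT B =====
-- _pack(flags): m |= f << i over enumerate(flags)
def packFlags (flags : List Int) : Int :=
  flags.zipIdx.foldl (fun m p => PySem.Int.bor m (p.1 <<< p.2)) 0

-- the dicts list digits 0..9 in insertion order, so masks[d] is digit d's mask
def masksResist : List Int := digit_map_resist.keys.map packFlags
def masksTemp : List Int := digit_map_temp.keys.map packFlags

-- _digit(masks, m): str(masks.index(m)), "?" on ValueError
def digitOf (masks : List Int) (m : Int) : String :=
  match PySem.List.index? masks m with
  | some i => PySem.Int.toStr (i : Int)
  | none => "?"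

-- loop body 'if ch in segs: mask |= 1 << segs.index(ch)' (index exists under the guard)
def maskStep (segs : List Char) (m : Int) (c : Char) : Int :=
  if segs.contains c then PySem.Int.bor m ((1:Int) <<< ((PySem.List.index? segs c).getD 0)) else m

-- one iteration of B's scan loop: run-boundary flush, then the segment-bit OR
def scanStep (segs : List Char) (masks : List Int) (s : Option Int × Int × List String) (e : Int × Char) :
    Option Int × Int × List String :=
  let s1 : Option Int × Int × List String :=
    if s.1 ≠ some e.1 then
      (some e.1, 0, match s.1 with | some _ => s.2.2 ++ [digitOf masks s.2.1] | none => s.2.2)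
    else s
  (s1.1, maskStep segs s1.2.1 e.2, s1.2.2)

-- the final 'if cur is not None: digits.append(...)'
def flushScan (masks : List Int) (st : Option Int × Int × List String) : List String :=
  match st.1 with | some _ => st.2.2 ++ [digitOf masks st.2.1] | none => st.2.2

def decode_segments_alt (active : List (String × Int)) (typename : String) : String :=
  let segs : List Char :=
    if typename == "resist" then ['A','B','C','D','E','F','G']
    else ['A','B','C','D','E','F','G','H','I','J']
  let masks : List Int := if typename == "resist" then masksResist else masksTemp
  let dot : Bool := active.any (fun y => y.1 == ".")
  -- lbl[0] raises IndexError on an empty label — those inputs are excluded by Pre_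
  let entries : List (Int × Char) :=
    PySem.List.sorted ((active.filter (fun y => !(y.1 == "."))).map
      (fun y => (y.2, (PySem.Str.pyGet? y.1 0).getD ' '))) (fun e => e.1) false
  let digits : List String :=
    flushScan masks (entries.foldl (scanStep segs masks) (none, 0, []))
  if dot && decide (2 ≤ digits.length) then
    PySem.Str.join "" (PySem.List.slice digits none (some (-1))) ++ "." ++ ((PySem.List.pyGet? digits (-1)).getD "")
  else
    PySem.Str.join "" digits

-- ===== PRECONDITION & SPEC =====
-- Pre_ excludes inputs containing an empty-string label: there A (and B) raises IndexError on lbl[0].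
def Pre_decode_segments (active : List (String × Int)) (typename : String) : Prop :=
  ∀ p ∈ active, p.1 ≠ ""
instance (active : List (String × Int)) (typename : String) : Decidable (Pre_decode_segments active typename) := by
  unfold Pre_decode_segments; infer_instance

def pvWitness_decode_segments : (List (String × Int)) × String :=
  ([("A", 1), ("B", 1), ("C", 1), (".", 0), ("B", 2), ("C", 2)], "resist")

def Spec_decode_segments (active : List (String × Int)) (typename : String) (out : String) : Prop := out = decode_segments_alt active typename
instance (active : List (String × Int)) (typename : String) (out : String) : Decidable (Spec_decode_segments active typename out) := by unfold Spec_decode_segments; infer_instance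

-- ===== CLAIM (what is proved, stated in full; the proofs are below) =====
def Claim_equal_decode_segments : Prop := ∀ (active : List (String × Int)) (typename : String), Dom_decode_segments active typename → Pre_decode_segments active typename → Spec_decode_segments active typename (decode_segments active typename)

-- ===== LEMMAS AND PROOFS =====

-- ---- A-side: what A's position dict holds per pid ----

theorem pv_initA_aux (l : List Int) (d : PySem.Dict Int (PySem.Set Char))
    (h : ∀ q, d.getD q PySem.Set.empty = PySem.Set.empty) (pid : Int) :
    (l.foldl (fun d k => d.insert k PySem.Set.empty) d).getD pid PySem.Set.empty = PySem.Set.empty := by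
  induction l generalizing d with
  | nil => exact h pid
  | cons k t ih =>
    simp only [List.foldl_cons]
    refine ih _ (fun q => ?_)
    rw [PySem.Dict.getD_insert]
    split_ifs with hq
    · rfl
    · exact h q

theorem pv_initA (l : List Int) (pid : Int) :
    (l.foldl (fun d k => d.insert k PySem.Set.empty) (PySem.Dict.empty : PySem.Dict Int (PySem.Set Char))).getD pid PySem.Set.empty = PySem.Set.empty :=
  pv_initA_aux l PySem.Dict.empty (fun q => PySem.Dict.getD_empty q PySem.Set.empty) pid

-- the first letters recorded for one position, in encounter order
def pv_charsOf (pid : Int) (l : List (String × Int)) : List Char :=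
  (l.filter (fun y => !(y.1 == ".") && (y.2 == pid))).map (fun y => (PySem.Str.pyGet? y.1 0).getD ' ')

theorem pv_getDFold (l : List (String × Int)) (d : PySem.Dict Int (PySem.Set Char)) (pid : Int) :
    (l.foldl (fun d y => if y.1 == "." then d
        else d.modify y.2 PySem.Set.empty (fun s => PySem.Set.add s ((PySem.Str.pyGet? y.1 0).getD ' '))) d).getD pid PySem.Set.empty
    = PySem.Set.update (d.getD pid PySem.Set.empty) (pv_charsOf pid l) := by
  induction l generalizing d with
  | nil => rfl
  | cons y t ih =>
    simp only [List.foldl_cons, pv_charsOf, List.filter_cons] at *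
    cases h : (y.1 == ".") with
    | true => simp only [if_true, Bool.not_true, Bool.false_and, Bool.false_eq_true, ite_false]; exact ih d
    | false =>
      simp only [Bool.false_eq_true, if_false, Bool.not_false, Bool.true_and]
      by_cases hp : (y.2 == pid) = true
      · have hpe : y.2 = pid := by simpa using hp
        simp only [hp, ite_true, List.map_cons]
        rw [ih]
        have hup : ∀ (s : PySem.Set Char) c rest, PySem.Set.update s (c :: rest) = PySem.Set.update (PySem.Set.add s c) rest := fun _ _ _ => rfl
        rw [hup]
        congr 1
        rw [PySem.Dict.getD_modify, if_pos hpe.symm, hpe]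
      · have hpe : ¬ (pid = y.2) := fun he => hp (by simp [he])
        simp only [hp, Bool.false_eq_true, ite_false]
        rw [ih]
        congr 1
        rw [PySem.Dict.getD_modify, if_neg hpe]

-- ---- B-side: the scan over the sorted hit list, run by run ----

-- the mask accumulated over a char list (B's inner OR steps)
def fMask (segs : List Char) (cs : List Char) (m : Int) : Int :=
  cs.foldl (maskStep segs) m

-- reference run decomposition: first run's digit, then the rest
def runsRef (segs : List Char) (masks : List Int) : List (Int × Char) → List String
  | [] => []
  | e :: t =>
    digitOf masks (fMask segs ((t.filter (fun x => x.1 == e.1)).map (fun x => x.2)) (maskStep segs 0 e.2))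
      :: runsRef segs masks (t.filter (fun x => !(x.1 == e.1)))
termination_by l => l.length
decreasing_by simpa using Nat.lt_succ_of_le (le_trans (List.length_filter_le _ t.attach) (le_of_eq (by simp)))

theorem pv_runsRef_nil (segs : List Char) (masks : List Int) : runsRef segs masks [] = [] := by
  rw [runsRef]

theorem pv_runsRef_cons (segs : List Char) (masks : List Int) (e : Int × Char) (t : List (Int × Char)) :
    runsRef segs masks (e :: t)
    = digitOf masks (fMask segs ((t.filter (fun x => x.1 == e.1)).map (fun x => x.2)) (maskStep segs 0 e.2))
        :: runsRef segs masks (t.filter (fun x => !(x.1 == e.1))) := by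
  rw [runsRef]

theorem pv_scan_go (segs : List Char) (masks : List Int) :
    ∀ (L : List (Int × Char)) (pid m : Int) (acc : List String),
    (L.map (fun e => e.1)).Pairwise (· ≤ ·) → (∀ q ∈ L, pid ≤ q.1) →
    flushScan masks (L.foldl (scanStep segs masks) (some pid, m, acc))
    = acc ++ digitOf masks (fMask segs ((L.filter (fun x => x.1 == pid)).map (fun x => x.2)) m)
        :: runsRef segs masks (L.filter (fun x => !(x.1 == pid))) := by
  intro L
  induction L with
  | nil => intro pid m acc _ _; simp [flushScan, fMask, pv_runsRef_nil]
  | cons e t ih =>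
    obtain ⟨e1, e2⟩ := e
    intro pid m acc hpw hlb
    simp only [List.map_cons, List.pairwise_cons] at hpw
    by_cases hp : e1 = pid
    · subst hp
      have hstep : scanStep segs masks (some e1, m, acc) (e1, e2) = (some e1, maskStep segs m e2, acc) := by
        simp [scanStep]
      rw [List.foldl_cons, hstep, ih e1 (maskStep segs m e2) acc hpw.2
        (fun q hq => hpw.1 q.1 (List.mem_map_of_mem hq))]
      simp [fMask]
    · have hpe : pid ≠ e1 := fun h => hp h.symm
      have hlt : pid < e1 := lt_of_le_of_ne (hlb (e1, e2) List.mem_cons_self) hpe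
      have hstep : scanStep segs masks (some pid, m, acc) (e1, e2)
          = (some e1, maskStep segs 0 e2, acc ++ [digitOf masks m]) := by
        simp [scanStep, hpe]
      have htno : ∀ q ∈ t, ¬ (q.1 = pid) := by
        intro q hq h
        exact absurd (h ▸ hpw.1 q.1 (List.mem_map_of_mem hq)) (not_le_of_gt hlt)
      rw [List.foldl_cons, hstep, ih e1 (maskStep segs 0 e2) (acc ++ [digitOf masks m]) hpw.2
        (fun q hq => hpw.1 q.1 (List.mem_map_of_mem hq))]
      have h1 : ((e1, e2) :: t).filter (fun x => x.1 == pid) = [] := by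
        simp only [List.filter_cons]
        rw [if_neg (by simpa using hp)]
        exact List.filter_eq_nil_iff.2 (fun q hq => by simpa using htno q hq)
      have h2 : ((e1, e2) :: t).filter (fun x => !(x.1 == pid)) = (e1, e2) :: t := by
        simp only [List.filter_cons]
        rw [if_pos (by simpa using hp)]
        exact congrArg _ (List.filter_eq_self.2 (fun q hq => by simpa using htno q hq))
      rw [h1, h2, pv_runsRef_cons]
      simp [fMask]

theorem pv_scan_top (segs : List Char) (masks : List Int) (L : List (Int × Char))
    (hpw : (L.map (fun e => e.1)).Pairwise (· ≤ ·)) :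
    flushScan masks (L.foldl (scanStep segs masks) (none, 0, [])) = runsRef segs masks L := by
  cases L with
  | nil => simp [flushScan, pv_runsRef_nil]
  | cons e t =>
    obtain ⟨e1, e2⟩ := e
    have hstep : scanStep segs masks (none, 0, []) (e1, e2) = (some e1, maskStep segs 0 e2, []) := by
      simp [scanStep]
    simp only [List.map_cons, List.pairwise_cons] at hpw
    rw [List.foldl_cons, hstep,
      pv_scan_go segs masks t e1 (maskStep segs 0 e2) [] hpw.2 (fun q hq => hpw.1 q.1 (List.mem_map_of_mem hq)),
      pv_runsRef_cons]
    simp [fMask]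

-- ---- runsRef as a map over the distinct pids (first-occurrence order) ----

theorem pv_discard_ofList {α : Type} [BEq α] [LawfulBEq α] (ks : List α) (x : α) :
    PySem.Set.discard (PySem.Set.ofList ks) x = PySem.Set.ofList (ks.filter (fun k => !(k == x))) := by
  have hdis : ∀ (s : PySem.Set α) (y : α), PySem.Set.discard s y = s.filter (fun z => !(z == y)) :=
    fun _ _ => rfl
  induction ks with
  | nil => rfl
  | cons k t ih =>
    rw [PySem.Set.ofList_cons, List.filter_cons]
    by_cases hk : (k == x) = true
    · have hke : k = x := by simpa using hk
      subst hke
      rw [if_neg (by simp)]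
      rw [hdis, List.filter_cons, if_neg (by simp)]
      rw [hdis] at ih
      rw [hdis, List.filter_filter]
      rw [List.filter_congr (fun (a : α) (_ : a ∈ (PySem.Set.ofList t : List α)) => Bool.and_self (!(a == k)))]
      exact ih
    · rw [if_pos (by simpa using hk)]
      rw [PySem.Set.ofList_cons]
      rw [hdis, List.filter_cons, if_pos (by simpa using hk)]
      congr 1
      rw [hdis] at ih
      rw [hdis, hdis, ← ih, List.filter_filter, List.filter_filter]
      exact List.filter_congr (fun a _ => Bool.and_comm _ _)

theorem pv_map_fst_filter (t : List (Int × Char)) (v : Int) :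
    (t.filter (fun x => !(x.1 == v))).map (fun x => x.1) = (t.map (fun x => x.1)).filter (fun k => !(k == v)) := by
  induction t with
  | nil => rfl
  | cons e t ih =>
    simp only [List.filter_cons, List.map_cons]
    by_cases h : (e.1 == v) = true
    · simp only [h, Bool.not_true, Bool.false_eq_true, ite_false]; exact ih
    · simp only [h, Bool.not_false, ite_true, List.map_cons]
      rw [ih]

theorem pv_runsRef_eq (segs : List Char) (masks : List Int) :
    ∀ (n : Nat) (L : List (Int × Char)), L.length ≤ n →
    runsRef segs masks L
    = (PySem.Set.ofList (L.map (fun e => e.1))).map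
        (fun pid => digitOf masks (fMask segs ((L.filter (fun e => e.1 == pid)).map (fun e => e.2)) 0)) := by
  intro n
  induction n with
  | zero => intro L hL; rw [List.length_eq_zero_iff.1 (Nat.le_zero.1 hL), pv_runsRef_nil]; rfl
  | succ n ih =>
    intro L hL
    cases L with
    | nil => rw [pv_runsRef_nil]; rfl
    | cons e t =>
      rw [pv_runsRef_cons]
      rw [ih (t.filter (fun x => !(x.1 == e.1)))
        (le_trans (List.length_filter_le _ t) (Nat.le_of_succ_le_succ hL))]
      rw [List.map_cons, PySem.Set.ofList_cons, List.map_cons]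
      congr 1
      · have h : (e :: t).filter (fun x => x.1 == e.1) = e :: t.filter (fun x => x.1 == e.1) := by
          simp [List.filter_cons]
        rw [h, List.map_cons]
        rfl
      · rw [pv_discard_ofList, ← pv_map_fst_filter]
        apply List.map_congr_left
        intro pid hpid
        have hne : pid ≠ e.1 := by
          rcases List.mem_map.1 ((PySem.Set.mem_ofList _ _).1 hpid) with ⟨z, hz, hze⟩
          rcases List.mem_filter.1 hz with ⟨_, hz2⟩
          intro h; rw [← hze] at h; simp [h] at hz2
        rw [List.filter_cons, if_neg (by simpa using fun h : e.1 = pid => hne h.symm), List.filter_filter]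
        refine congrArg (fun l : List (Int × Char) => digitOf masks (fMask segs (List.map (fun e => e.2) l) 0)) ?_
        refine List.filter_congr ?_
        intro (a : Int × Char) _
        by_cases hq : (a.1 == pid) = true
        · have hae : (a.1 == e.1) = false := by
            have hap : a.1 = pid := by simpa using hq
            exact beq_eq_false_iff_ne.2 (by rw [hap]; exact hne)
          simp [hq, hae]
        · simp [hq]

-- ---- the sorted distinct pids agree between A and B ----

theorem pv_ofList_pairwise_lt (l : List Int) (h : l.Pairwise (· ≤ ·)) :
    (PySem.Set.ofList l).Pairwise (· < ·) := by
  induction l with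
  | nil => exact List.Pairwise.nil
  | cons x t ih =>
    rw [List.pairwise_cons] at h
    rw [PySem.Set.ofList_cons]
    refine List.pairwise_cons.2 ⟨?_, ?_⟩
    · intro y hy
      rcases (PySem.Set.mem_discard _ _ _).1 hy with ⟨hyt, hyx⟩
      exact lt_of_le_of_ne (h.1 y ((PySem.Set.mem_ofList _ _).1 hyt)) (fun he => hyx he.symm)
    · have hdis : PySem.Set.discard (PySem.Set.ofList t) x = (PySem.Set.ofList t).filter (fun z => !(z == x)) := rfl
      rw [hdis]
      exact List.Pairwise.filter _ (ih h.2)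

theorem pv_P_eq (active : List (String × Int)) :
    PySem.Set.ofList ((PySem.List.sorted ((active.filter (fun y => !(y.1 == "."))).map
        (fun y => (y.2, (PySem.Str.pyGet? y.1 0).getD ' '))) (fun e => e.1) false).map (fun e => e.1))
    = PySem.List.sorted (PySem.Set.ofList ((active.filter (fun y => !(y.1 == "."))).map (fun y => y.2))) (fun x => x) false := by
  symm
  apply PySem.List.sorted_eq_of_perm_of_pairwise_lt
  · rw [List.perm_ext_iff_of_nodup (PySem.Set.nodup_ofList _) (PySem.Set.nodup_ofList _)]
    intro a
    rw [PySem.Set.mem_ofList, PySem.Set.mem_ofList,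
      ((PySem.List.sorted_perm ((active.filter (fun y => !(y.1 == "."))).map
        (fun y => (y.2, (PySem.Str.pyGet? y.1 0).getD ' '))) (fun e => e.1) false).map (fun e => e.1)).mem_iff]
    simp only [List.mem_map]
    constructor
    · rintro ⟨e, ⟨y, hy, rfl⟩, rfl⟩
      exact ⟨y, hy, rfl⟩
    · rintro ⟨y, hy, rfl⟩
      exact ⟨(y.2, (PySem.Str.pyGet? y.1 0).getD ' '), ⟨y, hy, rfl⟩, rfl⟩
  · exact pv_ofList_pairwise_lt _
      (PySem.List.sorted_map_key_pairwise ((active.filter (fun y => !(y.1 == "."))).map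
        (fun y => (y.2, (PySem.Str.pyGet? y.1 0).getD ' '))) (fun e => e.1))

-- ---- the per-position letters agree as sets between A and B ----

theorem pv_mem_chars (active : List (String × Int)) (pid : Int) (x : Char) :
    x ∈ ((PySem.List.sorted ((active.filter (fun y => !(y.1 == "."))).map
        (fun y => (y.2, (PySem.Str.pyGet? y.1 0).getD ' '))) (fun e => e.1) false).filter
          (fun e => e.1 == pid)).map (fun e => e.2)
    ↔ x ∈ pv_charsOf pid active := by
  have hp := PySem.List.sorted_perm ((active.filter (fun y => !(y.1 == "."))).map
      (fun y => (y.2, (PySem.Str.pyGet? y.1 0).getD ' '))) (fun e => e.1) false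
  simp only [List.mem_map, List.mem_filter, hp.mem_iff, pv_charsOf, Bool.and_eq_true]
  constructor
  · rintro ⟨e, ⟨⟨y, ⟨hy1, hy2⟩, rfl⟩, hpid⟩, rfl⟩
    exact ⟨y, ⟨hy1, hy2, by simpa using hpid⟩, rfl⟩
  · rintro ⟨y, ⟨hy1, hy2, hy3⟩, rfl⟩
    exact ⟨(y.2, (PySem.Str.pyGet? y.1 0).getD ' '), ⟨⟨y, ⟨hy1, hy2⟩, rfl⟩, by simpa using hy3⟩, rfl⟩

-- ---- mask arithmetic: B's OR-fold equals the membership mask, in Nat ----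

def pv_bit (segs : List Char) (c : Char) : Nat :=
  match PySem.List.index? segs c with
  | some j => 1 <<< j
  | none => 0

def pv_maskBits (segs : List Char) (cs : List Char) : Nat :=
  cs.foldr (fun c acc => pv_bit segs c ||| acc) 0

theorem pv_maskBits_cons (segs : List Char) (c : Char) (cs : List Char) :
    pv_maskBits segs (c :: cs) = pv_bit segs c ||| pv_maskBits segs cs := rfl

theorem pv_fMask_eq (segs : List Char) :
    ∀ (cs : List Char) (m : Nat), fMask segs cs (m : Int) = ((m ||| pv_maskBits segs cs : Nat) : Int) := by
  intro cs
  induction cs with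
  | nil => intro m; simp [fMask, pv_maskBits, Nat.or_zero]
  | cons c cs ih =>
    intro m
    have hfm : fMask segs (c :: cs) (m : Int) = fMask segs cs (maskStep segs (m : Int) c) := rfl
    by_cases hc : segs.contains c = true
    · rcases Option.isSome_iff_exists.1 ((PySem.List.index?_isSome_iff segs c).2 (by simpa using hc)) with ⟨j, hj⟩
      have hbit : pv_bit segs c = 1 <<< j := by unfold pv_bit; rw [hj]
      have hstep : maskStep segs (m : Int) c = ((m ||| (1 <<< j) : Nat) : Int) := by
        rw [maskStep, if_pos hc, hj]
        rw [show ((1:Int) <<< (Option.getD (some j) 0)) = (((1 <<< j : Nat) : Nat) : Int) by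
          simp [Int.shiftLeft_eq, Nat.shiftLeft_eq]]
        exact PySem.Int.bor_natCast m (1 <<< j)
      rw [hfm, hstep, ih, pv_maskBits_cons, hbit, Nat.lor_assoc]
    · have hbit : pv_bit segs c = 0 := by
        unfold pv_bit
        rw [(PySem.List.index?_eq_none_iff segs c).2 (by simpa using hc)]
      have hstep : maskStep segs (m : Int) c = (m : Int) := by
        rw [maskStep, if_neg (by simpa using hc)]
      rw [hfm, hstep, ih, pv_maskBits_cons, hbit, Nat.zero_or]

-- membership masks written over the seven / ten membership booleans
def pv_maskR (b1 b2 b3 b4 b5 b6 b7 : Bool) : Nat :=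
  (if b1 then 1 else 0) ||| ((if b2 then 2 else 0) ||| ((if b3 then 4 else 0) |||
    ((if b4 then 8 else 0) ||| ((if b5 then 16 else 0) ||| ((if b6 then 32 else 0) |||
      (if b7 then 64 else 0))))))

def pv_maskT (b1 b2 b3 b4 b5 b6 b7 b8 b9 b10 : Bool) : Nat :=
  pv_maskR b1 b2 b3 b4 b5 b6 b7 ||| ((if b8 then 128 else 0) ||| ((if b9 then 256 else 0) |||
    (if b10 then 512 else 0)))

theorem pv_maskBits_R (cs : List Char) :
    pv_maskBits ['A','B','C','D','E','F','G'] cs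
    = pv_maskR (cs.contains 'A') (cs.contains 'B') (cs.contains 'C') (cs.contains 'D') (cs.contains 'E') (cs.contains 'F') (cs.contains 'G') := by
  induction cs with
  | nil => decide
  | cons c cs ih =>
    rw [pv_maskBits_cons, ih]
    by_cases h1 : c = 'A'
    · subst h1
      rw [show pv_bit ['A','B','C','D','E','F','G'] 'A' = 1 from rfl]
      simp only [List.contains_cons, show (('A':Char) == 'A') = true from rfl, show (('B':Char) == 'A') = false from rfl, show (('C':Char) == 'A') = false from rfl, show (('D':Char) == 'A') = false from rfl, show (('E':Char) == 'A') = false from rfl, show (('F':Char) == 'A') = false from rfl, show (('G':Char) == 'A') = false from rfl, Bool.true_or, Bool.false_or]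
      generalize cs.contains 'A' = b1; generalize cs.contains 'B' = b2; generalize cs.contains 'C' = b3; generalize cs.contains 'D' = b4; generalize cs.contains 'E' = b5; generalize cs.contains 'F' = b6; generalize cs.contains 'G' = b7
      revert b1 b2 b3 b4 b5 b6 b7
      decide
    by_cases h2 : c = 'B'
    · subst h2
      rw [show pv_bit ['A','B','C','D','E','F','G'] 'B' = 2 from rfl]
      simp only [List.contains_cons, show (('A':Char) == 'B') = false from rfl, show (('B':Char) == 'B') = true from rfl, show (('C':Char) == 'B') = false from rfl, show (('D':Char) == 'B') = false from rfl, show (('E':Char) == 'B') = false from rfl, show (('F':Char) == 'B') = false from rfl, show (('G':Char) == 'B') = false from rfl, Bool.true_or, Bool.false_or]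
      generalize cs.contains 'A' = b1; generalize cs.contains 'B' = b2; generalize cs.contains 'C' = b3; generalize cs.contains 'D' = b4; generalize cs.contains 'E' = b5; generalize cs.contains 'F' = b6; generalize cs.contains 'G' = b7
      revert b1 b2 b3 b4 b5 b6 b7
      decide
    by_cases h3 : c = 'C'
    · subst h3
      rw [show pv_bit ['A','B','C','D','E','F','G'] 'C' = 4 from rfl]
      simp only [List.contains_cons, show (('A':Char) == 'C') = false from rfl, show (('B':Char) == 'C') = false from rfl, show (('C':Char) == 'C') = true from rfl, show (('D':Char) == 'C') = false from rfl, show (('E':Char) == 'C') = false from rfl, show (('F':Char) == 'C') = false from rfl, show (('G':Char) == 'C') = false from rfl, Bool.true_or, Bool.false_or]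
      generalize cs.contains 'A' = b1; generalize cs.contains 'B' = b2; generalize cs.contains 'C' = b3; generalize cs.contains 'D' = b4; generalize cs.contains 'E' = b5; generalize cs.contains 'F' = b6; generalize cs.contains 'G' = b7
      revert b1 b2 b3 b4 b5 b6 b7
      decide
    by_cases h4 : c = 'D'
    · subst h4
      rw [show pv_bit ['A','B','C','D','E','F','G'] 'D' = 8 from rfl]
      simp only [List.contains_cons, show (('A':Char) == 'D') = false from rfl, show (('B':Char) == 'D') = false from rfl, show (('C':Char) == 'D') = false from rfl, show (('D':Char) == 'D') = true from rfl, show (('E':Char) == 'D') = false from rfl, show (('F':Char) == 'D') = false from rfl, show (('G':Char) == 'D') = false from rfl, Bool.true_or, Bool.false_or]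
      generalize cs.contains 'A' = b1; generalize cs.contains 'B' = b2; generalize cs.contains 'C' = b3; generalize cs.contains 'D' = b4; generalize cs.contains 'E' = b5; generalize cs.contains 'F' = b6; generalize cs.contains 'G' = b7
      revert b1 b2 b3 b4 b5 b6 b7
      decide
    by_cases h5 : c = 'E'
    · subst h5
      rw [show pv_bit ['A','B','C','D','E','F','G'] 'E' = 16 from rfl]
      simp only [List.contains_cons, show (('A':Char) == 'E') = false from rfl, show (('B':Char) == 'E') = false from rfl, show (('C':Char) == 'E') = false from rfl, show (('D':Char) == 'E') = false from rfl, show (('E':Char) == 'E') = true from rfl, show (('F':Char) == 'E') = false from rfl, show (('G':Char) == 'E') = false from rfl, Bool.true_or, Bool.false_or]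
      generalize cs.contains 'A' = b1; generalize cs.contains 'B' = b2; generalize cs.contains 'C' = b3; generalize cs.contains 'D' = b4; generalize cs.contains 'E' = b5; generalize cs.contains 'F' = b6; generalize cs.contains 'G' = b7
      revert b1 b2 b3 b4 b5 b6 b7
      decide
    by_cases h6 : c = 'F'
    · subst h6
      rw [show pv_bit ['A','B','C','D','E','F','G'] 'F' = 32 from rfl]
      simp only [List.contains_cons, show (('A':Char) == 'F') = false from rfl, show (('B':Char) == 'F') = false from rfl, show (('C':Char) == 'F') = false from rfl, show (('D':Char) == 'F') = false from rfl, show (('E':Char) == 'F') = false from rfl, show (('F':Char) == 'F') = true from rfl, show (('G':Char) == 'F') = false from rfl, Bool.true_or, Bool.false_or]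
      generalize cs.contains 'A' = b1; generalize cs.contains 'B' = b2; generalize cs.contains 'C' = b3; generalize cs.contains 'D' = b4; generalize cs.contains 'E' = b5; generalize cs.contains 'F' = b6; generalize cs.contains 'G' = b7
      revert b1 b2 b3 b4 b5 b6 b7
      decide
    by_cases h7 : c = 'G'
    · subst h7
      rw [show pv_bit ['A','B','C','D','E','F','G'] 'G' = 64 from rfl]
      simp only [List.contains_cons, show (('A':Char) == 'G') = false from rfl, show (('B':Char) == 'G') = false from rfl, show (('C':Char) == 'G') = false from rfl, show (('D':Char) == 'G') = false from rfl, show (('E':Char) == 'G') = false from rfl, show (('F':Char) == 'G') = false from rfl, show (('G':Char) == 'G') = true from rfl, Bool.true_or, Bool.false_or]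
      generalize cs.contains 'A' = b1; generalize cs.contains 'B' = b2; generalize cs.contains 'C' = b3; generalize cs.contains 'D' = b4; generalize cs.contains 'E' = b5; generalize cs.contains 'F' = b6; generalize cs.contains 'G' = b7
      revert b1 b2 b3 b4 b5 b6 b7
      decide
    · have hb : pv_bit ['A','B','C','D','E','F','G'] c = 0 := by
        unfold pv_bit
        rw [(PySem.List.index?_eq_none_iff _ c).2 (by simp [h1, h2, h3, h4, h5, h6, h7])]
      rw [hb, Nat.zero_or]
      simp only [List.contains_cons,
        beq_eq_false_iff_ne.2 (fun h => h1 h.symm),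
        beq_eq_false_iff_ne.2 (fun h => h2 h.symm),
        beq_eq_false_iff_ne.2 (fun h => h3 h.symm),
        beq_eq_false_iff_ne.2 (fun h => h4 h.symm),
        beq_eq_false_iff_ne.2 (fun h => h5 h.symm),
        beq_eq_false_iff_ne.2 (fun h => h6 h.symm),
        beq_eq_false_iff_ne.2 (fun h => h7 h.symm), Bool.false_or]

theorem pv_maskBits_T (cs : List Char) :
    pv_maskBits ['A','B','C','D','E','F','G','H','I','J'] cs
    = pv_maskT (cs.contains 'A') (cs.contains 'B') (cs.contains 'C') (cs.contains 'D') (cs.contains 'E') (cs.contains 'F') (cs.contains 'G') (cs.contains 'H') (cs.contains 'I') (cs.contains 'J') := by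
  induction cs with
  | nil => decide
  | cons c cs ih =>
    rw [pv_maskBits_cons, ih]
    by_cases h1 : c = 'A'
    · subst h1
      rw [show pv_bit ['A','B','C','D','E','F','G','H','I','J'] 'A' = 1 from rfl]
      simp only [List.contains_cons, show (('A':Char) == 'A') = true from rfl, show (('B':Char) == 'A') = false from rfl, show (('C':Char) == 'A') = false from rfl, show (('D':Char) == 'A') = false from rfl, show (('E':Char) == 'A') = false from rfl, show (('F':Char) == 'A') = false from rfl, show (('G':Char) == 'A') = false from rfl, show (('H':Char) == 'A') = false from rfl, show (('I':Char) == 'A') = false from rfl, show (('J':Char) == 'A') = false from rfl, Bool.true_or, Bool.false_or]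
      generalize cs.contains 'A' = b1; generalize cs.contains 'B' = b2; generalize cs.contains 'C' = b3; generalize cs.contains 'D' = b4; generalize cs.contains 'E' = b5; generalize cs.contains 'F' = b6; generalize cs.contains 'G' = b7; generalize cs.contains 'H' = b8; generalize cs.contains 'I' = b9; generalize cs.contains 'J' = b10
      revert b1 b2 b3 b4 b5 b6 b7 b8 b9 b10
      decide
    by_cases h2 : c = 'B'
    · subst h2
      rw [show pv_bit ['A','B','C','D','E','F','G','H','I','J'] 'B' = 2 from rfl]
      simp only [List.contains_cons, show (('A':Char) == 'B') = false from rfl, show (('B':Char) == 'B') = true from rfl, show (('C':Char) == 'B') = false from rfl, show (('D':Char) == 'B') = false from rfl, show (('E':Char) == 'B') = false from rfl, show (('F':Char) == 'B') = false from rfl, show (('G':Char) == 'B') = false from rfl, show (('H':Char) == 'B') = false from rfl, show (('I':Char) == 'B') = false from rfl, show (('J':Char) == 'B') = false from rfl, Bool.true_or, Bool.false_or]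
      generalize cs.contains 'A' = b1; generalize cs.contains 'B' = b2; generalize cs.contains 'C' = b3; generalize cs.contains 'D' = b4; generalize cs.contains 'E' = b5; generalize cs.contains 'F' = b6; generalize cs.contains 'G' = b7; generalize cs.contains 'H' = b8; generalize cs.contains 'I' = b9; generalize cs.contains 'J' = b10
      revert b1 b2 b3 b4 b5 b6 b7 b8 b9 b10
      decide
    by_cases h3 : c = 'C'
    · subst h3
      rw [show pv_bit ['A','B','C','D','E','F','G','H','I','J'] 'C' = 4 from rfl]
      simp only [List.contains_cons, show (('A':Char) == 'C') = false from rfl, show (('B':Char) == 'C') = false from rfl, show (('C':Char) == 'C') = true from rfl, show (('D':Char) == 'C') = false from rfl, show (('E':Char) == 'C') = false from rfl, show (('F':Char) == 'C') = false from rfl, show (('G':Char) == 'C') = false from rfl, show (('H':Char) == 'C') = false from rfl, show (('I':Char) == 'C') = false from rfl, show (('J':Char) == 'C') = false from rfl, Bool.true_or, Bool.false_or]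
      generalize cs.contains 'A' = b1; generalize cs.contains 'B' = b2; generalize cs.contains 'C' = b3; generalize cs.contains 'D' = b4; generalize cs.contains 'E' = b5; generalize cs.contains 'F' = b6; generalize cs.contains 'G' = b7; generalize cs.contains 'H' = b8; generalize cs.contains 'I' = b9; generalize cs.contains 'J' = b10
      revert b1 b2 b3 b4 b5 b6 b7 b8 b9 b10
      decide
    by_cases h4 : c = 'D'
    · subst h4
      rw [show pv_bit ['A','B','C','D','E','F','G','H','I','J'] 'D' = 8 from rfl]
      simp only [List.contains_cons, show (('A':Char) == 'D') = false from rfl, show (('B':Char) == 'D') = false from rfl, show (('C':Char) == 'D') = false from rfl, show (('D':Char) == 'D') = true from rfl, show (('E':Char) == 'D') = false from rfl, show (('F':Char) == 'D') = false from rfl, show (('G':Char) == 'D') = false from rfl, show (('H':Char) == 'D') = false from rfl, show (('I':Char) == 'D') = false from rfl, show (('J':Char) == 'D') = false from rfl, Bool.true_or, Bool.false_or]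
      generalize cs.contains 'A' = b1; generalize cs.contains 'B' = b2; generalize cs.contains 'C' = b3; generalize cs.contains 'D' = b4; generalize cs.contains 'E' = b5; generalize cs.contains 'F' = b6; generalize cs.contains 'G' = b7; generalize cs.contains 'H' = b8; generalize cs.contains 'I' = b9; generalize cs.contains 'J' = b10
      revert b1 b2 b3 b4 b5 b6 b7 b8 b9 b10
      decide
    by_cases h5 : c = 'E'
    · subst h5
      rw [show pv_bit ['A','B','C','D','E','F','G','H','I','J'] 'E' = 16 from rfl]
      simp only [List.contains_cons, show (('A':Char) == 'E') = false from rfl, show (('B':Char) == 'E') = false from rfl, show (('C':Char) == 'E') = false from rfl, show (('D':Char) == 'E') = false from rfl, show (('E':Char) == 'E') = true from rfl, show (('F':Char) == 'E') = false from rfl, show (('G':Char) == 'E') = false from rfl, show (('H':Char) == 'E') = false from rfl, show (('I':Char) == 'E') = false from rfl, show (('J':Char) == 'E') = false from rfl, Bool.true_or, Bool.false_or]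
      generalize cs.contains 'A' = b1; generalize cs.contains 'B' = b2; generalize cs.contains 'C' = b3; generalize cs.contains 'D' = b4; generalize cs.contains 'E' = b5; generalize cs.contains 'F' = b6; generalize cs.contains 'G' = b7; generalize cs.contains 'H' = b8; generalize cs.contains 'I' = b9; generalize cs.contains 'J' = b10
      revert b1 b2 b3 b4 b5 b6 b7 b8 b9 b10
      decide
    by_cases h6 : c = 'F'
    · subst h6
      rw [show pv_bit ['A','B','C','D','E','F','G','H','I','J'] 'F' = 32 from rfl]
      simp only [List.contains_cons, show (('A':Char) == 'F') = false from rfl, show (('B':Char) == 'F') = false from rfl, show (('C':Char) == 'F') = false from rfl, show (('D':Char) == 'F') = false from rfl, show (('E':Char) == 'F') = false from rfl, show (('F':Char) == 'F') = true from rfl, show (('G':Char) == 'F') = false from rfl, show (('H':Char) == 'F') = false from rfl, show (('I':Char) == 'F') = false from rfl, show (('J':Char) == 'F') = false from rfl, Bool.true_or, Bool.false_or]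
      generalize cs.contains 'A' = b1; generalize cs.contains 'B' = b2; generalize cs.contains 'C' = b3; generalize cs.contains 'D' = b4; generalize cs.contains 'E' = b5; generalize cs.contains 'F' = b6; generalize cs.contains 'G' = b7; generalize cs.contains 'H' = b8; generalize cs.contains 'I' = b9; generalize cs.contains 'J' = b10
      revert b1 b2 b3 b4 b5 b6 b7 b8 b9 b10
      decide
    by_cases h7 : c = 'G'
    · subst h7
      rw [show pv_bit ['A','B','C','D','E','F','G','H','I','J'] 'G' = 64 from rfl]
      simp only [List.contains_cons, show (('A':Char) == 'G') = false from rfl, show (('B':Char) == 'G') = false from rfl, show (('C':Char) == 'G') = false from rfl, show (('D':Char) == 'G') = false from rfl, show (('E':Char) == 'G') = false from rfl, show (('F':Char) == 'G') = false from rfl, show (('G':Char) == 'G') = true from rfl, show (('H':Char) == 'G') = false from rfl, show (('I':Char) == 'G') = false from rfl, show (('J':Char) == 'G') = false from rfl, Bool.true_or, Bool.false_or]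
      generalize cs.contains 'A' = b1; generalize cs.contains 'B' = b2; generalize cs.contains 'C' = b3; generalize cs.contains 'D' = b4; generalize cs.contains 'E' = b5; generalize cs.contains 'F' = b6; generalize cs.contains 'G' = b7; generalize cs.contains 'H' = b8; generalize cs.contains 'I' = b9; generalize cs.contains 'J' = b10
      revert b1 b2 b3 b4 b5 b6 b7 b8 b9 b10
      decide
    by_cases h8 : c = 'H'
    · subst h8
      rw [show pv_bit ['A','B','C','D','E','F','G','H','I','J'] 'H' = 128 from rfl]
      simp only [List.contains_cons, show (('A':Char) == 'H') = false from rfl, show (('B':Char) == 'H') = false from rfl, show (('C':Char) == 'H') = false from rfl, show (('D':Char) == 'H') = false from rfl, show (('E':Char) == 'H') = false from rfl, show (('F':Char) == 'H') = false from rfl, show (('G':Char) == 'H') = false from rfl, show (('H':Char) == 'H') = true from rfl, show (('I':Char) == 'H') = false from rfl, show (('J':Char) == 'H') = false from rfl, Bool.true_or, Bool.false_or]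
      generalize cs.contains 'A' = b1; generalize cs.contains 'B' = b2; generalize cs.contains 'C' = b3; generalize cs.contains 'D' = b4; generalize cs.contains 'E' = b5; generalize cs.contains 'F' = b6; generalize cs.contains 'G' = b7; generalize cs.contains 'H' = b8; generalize cs.contains 'I' = b9; generalize cs.contains 'J' = b10
      revert b1 b2 b3 b4 b5 b6 b7 b8 b9 b10
      decide
    by_cases h9 : c = 'I'
    · subst h9
      rw [show pv_bit ['A','B','C','D','E','F','G','H','I','J'] 'I' = 256 from rfl]
      simp only [List.contains_cons, show (('A':Char) == 'I') = false from rfl, show (('B':Char) == 'I') = false from rfl, show (('C':Char) == 'I') = false from rfl, show (('D':Char) == 'I') = false from rfl, show (('E':Char) == 'I') = false from rfl, show (('F':Char) == 'I') = false from rfl, show (('G':Char) == 'I') = false from rfl, show (('H':Char) == 'I') = false from rfl, show (('I':Char) == 'I') = true from rfl, show (('J':Char) == 'I') = false from rfl, Bool.true_or, Bool.false_or]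
      generalize cs.contains 'A' = b1; generalize cs.contains 'B' = b2; generalize cs.contains 'C' = b3; generalize cs.contains 'D' = b4; generalize cs.contains 'E' = b5; generalize cs.contains 'F' = b6; generalize cs.contains 'G' = b7; generalize cs.contains 'H' = b8; generalize cs.contains 'I' = b9; generalize cs.contains 'J' = b10
      revert b1 b2 b3 b4 b5 b6 b7 b8 b9 b10
      decide
    by_cases h10 : c = 'J'
    · subst h10
      rw [show pv_bit ['A','B','C','D','E','F','G','H','I','J'] 'J' = 512 from rfl]
      simp only [List.contains_cons, show (('A':Char) == 'J') = false from rfl, show (('B':Char) == 'J') = false from rfl, show (('C':Char) == 'J') = false from rfl, show (('D':Char) == 'J') = false from rfl, show (('E':Char) == 'J') = false from rfl, show (('F':Char) == 'J') = false from rfl, show (('G':Char) == 'J') = false from rfl, show (('H':Char) == 'J') = false from rfl, show (('I':Char) == 'J') = false from rfl, show (('J':Char) == 'J') = true from rfl, Bool.true_or, Bool.false_or]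
      generalize cs.contains 'A' = b1; generalize cs.contains 'B' = b2; generalize cs.contains 'C' = b3; generalize cs.contains 'D' = b4; generalize cs.contains 'E' = b5; generalize cs.contains 'F' = b6; generalize cs.contains 'G' = b7; generalize cs.contains 'H' = b8; generalize cs.contains 'I' = b9; generalize cs.contains 'J' = b10
      revert b1 b2 b3 b4 b5 b6 b7 b8 b9 b10
      decide
    · have hb : pv_bit ['A','B','C','D','E','F','G','H','I','J'] c = 0 := by
        unfold pv_bit
        rw [(PySem.List.index?_eq_none_iff _ c).2 (by simp [h1, h2, h3, h4, h5, h6, h7, h8, h9, h10])]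
      rw [hb, Nat.zero_or]
      simp only [List.contains_cons,
        beq_eq_false_iff_ne.2 (fun h => h1 h.symm),
        beq_eq_false_iff_ne.2 (fun h => h2 h.symm),
        beq_eq_false_iff_ne.2 (fun h => h3 h.symm),
        beq_eq_false_iff_ne.2 (fun h => h4 h.symm),
        beq_eq_false_iff_ne.2 (fun h => h5 h.symm),
        beq_eq_false_iff_ne.2 (fun h => h6 h.symm),
        beq_eq_false_iff_ne.2 (fun h => h7 h.symm),
        beq_eq_false_iff_ne.2 (fun h => h8 h.symm),
        beq_eq_false_iff_ne.2 (fun h => h9 h.symm),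
        beq_eq_false_iff_ne.2 (fun h => h10 h.symm), Bool.false_or]

-- the concrete values of the two mask lists
theorem pv_masksR_eq : masksResist = [63, 6, 91, 79, 102, 109, 125, 7, 127, 111] := by decide

theorem pv_dmR_eq : digit_map_resist = (⟨[([1,1,1,1,1,1,0],"0"), ([0,1,1,0,0,0,0],"1"), ([1,1,0,1,1,0,1],"2"), ([1,1,1,1,0,0,1],"3"), ([0,1,1,0,0,1,1],"4"), ([1,0,1,1,0,1,1],"5"), ([1,0,1,1,1,1,1],"6"), ([1,1,1,0,0,0,0],"7"), ([1,1,1,1,1,1,1],"8"), ([1,1,1,1,0,1,1],"9")]⟩ : PySem.Dict (List Int) String) := by decide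

theorem pv_dmT_eq : digit_map_temp = (⟨[([1,1,1,1,1,1,1,1,0,0],"0"), ([0,0,1,1,0,0,0,0,0,0],"1"), ([1,1,1,0,1,1,1,0,1,1],"2"), ([1,1,1,1,1,1,0,0,1,1],"3"), ([0,0,1,1,0,0,0,1,1,1],"4"), ([1,1,0,1,1,1,0,1,1,1],"5"), ([1,1,0,1,1,1,1,1,1,1],"6"), ([1,1,1,1,0,0,0,0,0,0],"7"), ([1,1,1,1,1,1,1,1,1,1],"8"), ([1,1,1,1,0,0,0,1,1,1],"9")]⟩ : PySem.Dict (List Int) String) := by decide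

theorem pv_masksT_eq : masksTemp = [255, 12, 887, 831, 908, 955, 1019, 15, 1023, 911] := by decide

-- the inverse mask list answers exactly as the flag-list dict, over all membership patterns
theorem pv_table_R : ∀ (b1 b2 b3 b4 b5 b6 b7 : Bool),
    digitOf [63, 6, 91, 79, 102, 109, 125, 7, 127, 111] ((pv_maskR b1 b2 b3 b4 b5 b6 b7 : Nat) : Int)
    = ((⟨[([1,1,1,1,1,1,0],"0"), ([0,1,1,0,0,0,0],"1"), ([1,1,0,1,1,0,1],"2"), ([1,1,1,1,0,0,1],"3"), ([0,1,1,0,0,1,1],"4"), ([1,0,1,1,0,1,1],"5"), ([1,0,1,1,1,1,1],"6"), ([1,1,1,0,0,0,0],"7"), ([1,1,1,1,1,1,1],"8"), ([1,1,1,1,0,1,1],"9")]⟩ : PySem.Dict (List Int) String)).getD [if b1 then (1:Int) else 0, if b2 then 1 else 0, if b3 then 1 else 0,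
        if b4 then 1 else 0, if b5 then 1 else 0, if b6 then 1 else 0, if b7 then 1 else 0] "?" := by
  decide

theorem pv_table_T : ∀ (b1 b2 b3 b4 b5 b6 b7 b8 b9 b10 : Bool),
    digitOf [255, 12, 887, 831, 908, 955, 1019, 15, 1023, 911] ((pv_maskT b1 b2 b3 b4 b5 b6 b7 b8 b9 b10 : Nat) : Int)
    = ((⟨[([1,1,1,1,1,1,1,1,0,0],"0"), ([0,0,1,1,0,0,0,0,0,0],"1"), ([1,1,1,0,1,1,1,0,1,1],"2"), ([1,1,1,1,1,1,0,0,1,1],"3"), ([0,0,1,1,0,0,0,1,1,1],"4"), ([1,1,0,1,1,1,0,1,1,1],"5"), ([1,1,0,1,1,1,1,1,1,1],"6"), ([1,1,1,1,0,0,0,0,0,0],"7"), ([1,1,1,1,1,1,1,1,1,1],"8"), ([1,1,1,1,0,0,0,1,1,1],"9")]⟩ : PySem.Dict (List Int) String)).getD [if b1 then (1:Int) else 0, if b2 then 1 else 0, if b3 then 1 else 0,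
        if b4 then 1 else 0, if b5 then 1 else 0, if b6 then 1 else 0, if b7 then 1 else 0,
        if b8 then 1 else 0, if b9 then 1 else 0, if b10 then 1 else 0] "?" := by
  decide

theorem pv_contains_congr (l1 l2 : List Char) (h : ∀ x, x ∈ l1 ↔ x ∈ l2) (x : Char) :
    l1.contains x = l2.contains x := by
  by_cases hx : x ∈ l1
  · rw [List.contains_iff_mem.2 hx, List.contains_iff_mem.2 ((h x).1 hx)]
  · rw [Bool.eq_false_iff.2 (fun hc => hx (List.contains_iff_mem.1 hc)),
      Bool.eq_false_iff.2 (fun hc => hx ((h x).2 (List.contains_iff_mem.1 hc)))]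

theorem pv_set_contains_ofList (cs : List Char) (x : Char) :
    PySem.Set.contains (PySem.Set.ofList cs) x = cs.contains x := by
  rw [PySem.Set.contains_eq_listContains]
  exact pv_contains_congr _ _ (fun y => PySem.Set.mem_ofList _ _) x

-- per-position digit equality, resist branch
theorem pv_digit_eq_R (cs ds : List Char) (h : ∀ x, x ∈ ds ↔ x ∈ cs) :
    digitOf masksResist (fMask ['A','B','C','D','E','F','G'] ds 0)
    = digit_map_resist.getD ((['A','B','C','D','E','F','G'] : List Char).map
        (fun s => if PySem.Set.contains (PySem.Set.ofList cs) s then (1:Int) else 0)) "?" := by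
  have hcs : ∀ x, ds.contains x = PySem.Set.contains (PySem.Set.ofList cs) x := by
    intro x
    rw [pv_set_contains_ofList]
    exact pv_contains_congr ds cs h x
  have h0 : (0 : Int) = ((0 : Nat) : Int) := rfl
  rw [pv_masksR_eq, pv_dmR_eq, h0, pv_fMask_eq, Nat.zero_or, pv_maskBits_R]
  rw [hcs 'A', hcs 'B', hcs 'C', hcs 'D', hcs 'E', hcs 'F', hcs 'G']
  simp only [List.map_cons, List.map_nil]
  exact pv_table_R _ _ _ _ _ _ _

-- per-position digit equality, temp branch
theorem pv_digit_eq_T (cs ds : List Char) (h : ∀ x, x ∈ ds ↔ x ∈ cs) :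
    digitOf masksTemp (fMask ['A','B','C','D','E','F','G','H','I','J'] ds 0)
    = digit_map_temp.getD ((['A','B','C','D','E','F','G','H','I','J'] : List Char).map
        (fun s => if PySem.Set.contains (PySem.Set.ofList cs) s then (1:Int) else 0)) "?" := by
  have hcs : ∀ x, ds.contains x = PySem.Set.contains (PySem.Set.ofList cs) x := by
    intro x
    rw [pv_set_contains_ofList]
    exact pv_contains_congr ds cs h x
  have h0 : (0 : Int) = ((0 : Nat) : Int) := rfl
  rw [pv_masksT_eq, pv_dmT_eq, h0, pv_fMask_eq, Nat.zero_or, pv_maskBits_T]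
  rw [hcs 'A', hcs 'B', hcs 'C', hcs 'D', hcs 'E', hcs 'F', hcs 'G', hcs 'H', hcs 'I', hcs 'J']
  simp only [List.map_cons, List.map_nil]
  exact pv_table_T _ _ _ _ _ _ _ _ _ _

theorem pv_update_empty (cs : List Char) :
    PySem.Set.update (PySem.Set.empty : PySem.Set Char) cs = PySem.Set.ofList cs := rfl

-- digits of B = digits of A, per branch
theorem pv_digits_eq (active : List (String × Int)) (segO : List Char) (masks : List Int)
    (dm : PySem.Dict (List Int) String)
    (htable : ∀ cs ds : List Char, (∀ x, x ∈ ds ↔ x ∈ cs) →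
      digitOf masks (fMask segO ds 0)
      = dm.getD (segO.map (fun s => if PySem.Set.contains (PySem.Set.ofList cs) s then (1:Int) else 0)) "?") :
    flushScan masks ((PySem.List.sorted ((active.filter (fun y => !(y.1 == "."))).map
        (fun y => (y.2, (PySem.Str.pyGet? y.1 0).getD ' '))) (fun e => e.1) false).foldl
          (scanStep segO masks) (none, 0, []))
    = (PySem.List.sorted (PySem.Set.ofList ((active.filter (fun y => !(y.1 == "."))).map (fun y => y.2))) (fun x => x) false).foldl
        (fun acc pid => acc ++ [dm.getD
          (segO.map (fun s => if PySem.Set.contains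
            ((active.foldl (fun d y => if y.1 == "." then d
                else d.modify y.2 PySem.Set.empty (fun s => PySem.Set.add s ((PySem.Str.pyGet? y.1 0).getD ' ')))
              ((PySem.List.sorted (PySem.Set.ofList ((active.filter (fun y => !(y.1 == "."))).map (fun y => y.2))) (fun x => x) false).foldl
                (fun d pid => d.insert pid PySem.Set.empty) PySem.Dict.empty)).getD pid PySem.Set.empty) s
            then (1:Int) else 0)) "?"]) [] := by
  set L := PySem.List.sorted ((active.filter (fun y => !(y.1 == "."))).map
      (fun y => (y.2, (PySem.Str.pyGet? y.1 0).getD ' '))) (fun e => e.1) false with hL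
  rw [pv_scan_top segO masks L (by
    rw [hL]
    exact PySem.List.sorted_map_key_pairwise ((active.filter (fun y => !(y.1 == "."))).map
      (fun y => (y.2, (PySem.Str.pyGet? y.1 0).getD ' '))) (fun e => e.1))]
  rw [pv_runsRef_eq segO masks L.length L (le_refl _)]
  rw [hL, pv_P_eq active]
  rw [PySem.List.foldl_append_singleton_eq_map, List.nil_append]
  apply List.map_congr_left
  intro pid _
  rw [pv_getDFold, pv_initA, pv_update_empty]
  exact htable (pv_charsOf pid active) _ (fun x => pv_mem_chars active pid x)

-- ===== VERDICT (by name: the statement is the Claim_ definition above) =====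
theorem decode_segments_spec : Claim_equal_decode_segments := by
  intro active typename _ _
  unfold Spec_decode_segments
  by_cases htn : (typename == "resist") = true
  · simp only [decode_segments, decode_segments_alt, htn, if_true]
    rw [pv_digits_eq active ['A','B','C','D','E','F','G'] masksResist digit_map_resist
      (fun cs ds h => pv_digit_eq_R cs ds h)]
  · simp only [decode_segments, decode_segments_alt, htn, if_false, Bool.false_eq_true]
    rw [pv_digits_eq active ['A','B','C','D','E','F','G','H','I','J'] masksTemp digit_map_temp
      (fun cs ds h => pv_digit_eq_T cs ds h)]
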